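-- pv_equiv track=rewrite | github.com/VinayB2/EZTS-Training | Stack/validParentheis.py | isValid3
-- ===== SOURCE A (Python) =====
-- def isValid3(exp):
--     b = "({[]]})"
--     brackets = ""
--     for i in exp:
--         if i in b:
--             brackets += i
--     if len(brackets) %2 != 0: return False
--     i = 0
--     j = len(brackets) - 1
--     brackets = brackets.replace(']', '[')
--     brackets = brackets.replace(')', '(')
--     brackets = brackets.replace('}', '{')
--     while i < j:
--         if brackets[i] != brackets[j]: return False
--         i+=1
--         j-=1
--     return True
-- ===== SOURCE B (Python) =====
-- def isValid3(exp):
--     opener = {'(': '(', ')': '(', '[': '[', ']': '[', '{': '{', '}': '{'}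
--     types = [opener[c] for c in exp if c in opener]
--     if len(types) % 2:
--         return False
--     stack = types[:len(types) // 2]
--     for t in types[len(types) // 2:]:
--         if not stack or stack.pop() != t:
--             return False
--     return True
-- ===== Notes on version B (the rewrite author's own statement) =====
-- stated objective: alternative
-- what changed: A single dict-driven pass normalizes brackets (replacing the filter loop plus three str.replace passes), and the symmetry test uses a stack: push the first half, then pop it while scanning the second half, instead of A's in-place two-pointer walk.
import Mathlib
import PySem

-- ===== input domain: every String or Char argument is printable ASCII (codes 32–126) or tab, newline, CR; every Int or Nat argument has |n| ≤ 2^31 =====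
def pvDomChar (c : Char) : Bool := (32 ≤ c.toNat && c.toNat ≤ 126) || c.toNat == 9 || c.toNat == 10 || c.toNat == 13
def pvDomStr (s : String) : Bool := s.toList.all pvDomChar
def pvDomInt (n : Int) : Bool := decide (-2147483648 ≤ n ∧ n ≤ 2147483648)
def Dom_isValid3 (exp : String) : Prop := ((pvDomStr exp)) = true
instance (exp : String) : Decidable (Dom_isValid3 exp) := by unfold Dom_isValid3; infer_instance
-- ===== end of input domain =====

-- B normalizes brackets in one dict pass (instead of filter + three replace passes) and
-- checks symmetry with a stack — push the first half, pop it against the second half —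
-- instead of A's two-pointer index walk (objective: alternative).

-- ===== PORT A =====
-- Python's while-loop with two indices; i, j stay in range whenever the body reads
-- brackets[i]/brackets[j] (0 ≤ i < j ≤ len-1), so getD is exact there.
def pvWhileA (bs : List Char) (i j : Nat) : Bool :=
  if i < j then
    if bs.getD i ' ' ≠ bs.getD j ' ' then false else pvWhileA bs (i + 1) (j - 1)
  else true
  termination_by j - i
  decreasing_by omega

def isValid3 (exp : String) : Bool :=
  let b : List Char := "({[]]})".toList
  -- 'i in b' on a 1-char string i is PySem.Chars.isIn [i] b
  let brackets := exp.toList.foldl (fun acc i => if PySem.Chars.isIn [i] b then acc ++ [i] else acc) []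
  if brackets.length % 2 ≠ 0 then false
  else
    let brackets := PySem.Chars.replace (PySem.Chars.replace (PySem.Chars.replace brackets [']'] ['[']) [')'] ['(']) ['}'] ['{']
    pvWhileA brackets 0 (brackets.length - 1)

-- ===== PORT B =====
def pvNormDict : PySem.Dict Char Char :=
  PySem.Dict.ofList [('(', '('), (')', '('), ('[', '['), (']', '['), ('{', '{'), ('}', '{')]

-- B's for-loop over the second half: 'if not stack or stack.pop() != t: return False'.
-- stack.pop() takes the LAST element (getLast?/dropLast); none = empty stack ('not stack').
def pvStackLoop (stack : List Char) (rest : List Char) : Bool :=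
  match rest with
  | [] => true
  | t :: rest' =>
    match stack.getLast? with
    | none => false
    | some x => if x ≠ t then false else pvStackLoop stack.dropLast rest'

def isValid3_alt (exp : String) : Bool :=
  -- [opener[c] for c in exp if c in opener] is filterMap over the dict lookup
  let types := exp.toList.filterMap (fun c => pvNormDict.get? c)
  if types.length % 2 = 1 then false
  else pvStackLoop (types.take (types.length / 2)) (types.drop (types.length / 2))

-- ===== PRECONDITION & SPEC =====
def Spec_isValid3 (exp : String) (out : Bool) : Prop := out = isValid3_alt exp
instance (exp : String) (out : Bool) : Decidable (Spec_isValid3 exp out) := by unfold Spec_isValid3; infer_instance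

-- ===== CLAIM (what is proved, stated in full; the proofs are below) =====
def Claim_equal_isValid3 : Prop := ∀ (exp : String), Dom_isValid3 exp → Spec_isValid3 exp (isValid3 exp)

-- ===== LEMMAS AND PROOFS =====

-- str.replace with a single-char pattern is a map
lemma pv_go_single (a b' : Char) : ∀ (fuel : Nat) (l acc : List Char), l.length ≤ fuel →
    PySem.Chars.replace.go [a] [b'] fuel l acc = acc.reverse ++ l.map (fun c => if c = a then b' else c) := by
  intro fuel
  induction fuel with
  | zero => intro l acc h; interval_cases hl : l.length <;> simp_all [PySem.Chars.replace.go]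
  | succ f ih =>
    intro l acc h
    cases l with
    | nil => simp [PySem.Chars.replace.go]
    | cons c t =>
      simp only [PySem.Chars.replace.go, List.isPrefixOf, Bool.and_true]
      by_cases hca : a = c
      · subst hca
        simp only [beq_self_eq_true, if_pos]
        rw [ih _ _ (by simpa using Nat.le_of_succ_le_succ (by simpa using h))]
        simp
      · rw [if_neg (by simp [beq_iff_eq]; exact hca)]
        rw [ih _ _ (by simpa using Nat.le_of_succ_le_succ (by simpa using h))]
        simp [Ne.symm hca]

lemma pv_replace_single (cs : List Char) (a b' : Char) :
    PySem.Chars.replace cs [a] [b'] = cs.map (fun c => if c = a then b' else c) := by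
  simp [PySem.Chars.replace, pv_go_single a b' cs.length cs [] le_rfl]

def pvG (c : Char) : Char :=
  if (if (if c = ']' then '[' else c) = ')' then '(' else (if c = ']' then '[' else c)) = '}' then '{'
  else (if (if c = ']' then '[' else c) = ')' then '(' else (if c = ']' then '[' else c))

lemma pv_point (c : Char) :
    (if PySem.Chars.isIn [c] ("({[]]})".toList) then some (pvG c) else none) = pvNormDict.get? c := by
  by_cases h1 : c = '(' ; · subst h1; decide
  by_cases h2 : c = ')' ; · subst h2; decide
  by_cases h3 : c = '[' ; · subst h3; decide
  by_cases h4 : c = ']' ; · subst h4; decide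
  by_cases h5 : c = '{' ; · subst h5; decide
  by_cases h6 : c = '}' ; · subst h6; decide
  have hlist : "({[]]})".toList = ['(', '{', '[', ']', ']', '}', ')'] := rfl
  have hmem : c ∉ ("({[]]})".toList) := by
    rw [hlist]; simp [h1, h2, h3, h4, h5, h6]
  rw [if_neg]
  · have hd : pvNormDict =
        PySem.Dict.mk [('(', '('), (')', '('), ('[', '['), (']', '['), ('{', '{'), ('}', '{')] := by
      decide
    rw [hd]
    simp [beq_iff_eq, Ne.symm h1, Ne.symm h2, Ne.symm h3,
      Ne.symm h4, Ne.symm h5, Ne.symm h6, PySem.Dict.get?]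
  · intro hin
    exact hmem (((PySem.Chars.isIn_iff_infix _ _).mp hin).subset (List.mem_singleton_self c))

lemma pv_norm_eq (cs : List Char) :
    ((cs.filter (fun c => PySem.Chars.isIn [c] ("({[]]})".toList))).map pvG)
      = cs.filterMap (fun c => pvNormDict.get? c) := by
  induction cs with
  | nil => rfl
  | cons c t ih =>
    rw [List.filterMap_cons, ← pv_point c, List.filter_cons]
    have e : "({[]]})".toList = ['(', '{', '[', ']', ']', '}', ')'] := rfl
    rw [e] at ih ⊢
    by_cases h : PySem.Chars.isIn [c] ['(', '{', '[', ']', ']', '}', ')'] <;> simp [h, ih]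

-- the slice l[i..j] read by the two-pointer loop, decomposed at both ends
lemma pv_sandwich (l : List Char) (i j : Nat) (hij : i < j) (hj : j < l.length) :
    (l.drop i).take (j + 1 - i) = l.getD i ' ' :: ((l.drop (i + 1)).take (j - i - 1)) ++ [l.getD j ' '] := by
  have hi : i < l.length := lt_trans hij hj
  rw [List.drop_eq_getElem_cons hi]
  have h1 : j + 1 - i = (j - i - 1 + 1) + 1 := by omega
  rw [h1, List.take_succ_cons, List.take_add_one]
  have h2 : (l.drop (i + 1))[j - i - 1]? = some l[j] := by
    rw [List.getElem?_drop]
    rw [List.getElem?_eq_getElem (by omega)]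
    congr 1
    congr 1
    omega
  rw [h2]
  rw [List.getD_eq_getElem l ' ' hi, List.getD_eq_getElem l ' ' hj]
  simp

lemma pv_while_eq : ∀ (n : Nat) (l : List Char) (i j : Nat), j - i = n → j < l.length →
    pvWhileA l i j = decide ((l.drop i).take (j + 1 - i) = ((l.drop i).take (j + 1 - i)).reverse) := by
  intro n
  induction n using Nat.strong_induction_on with
  | _ n ih =>
    intro l i j hn hj
    by_cases hij : i < j
    · rw [pvWhileA, if_pos hij, pv_sandwich l i j hij hj]
      have hi : i < l.length := lt_trans hij hj
      by_cases hac : l.getD i ' ' = l.getD j ' '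
      · rw [if_neg (not_not_intro hac)]
        have hrec := ih ((j - 1) - (i + 1)) (by omega) l (i + 1) (j - 1) rfl (by omega)
        have harg : j - 1 + 1 - (i + 1) = j - i - 1 := by omega
        rw [harg] at hrec
        rw [hrec, hac, decide_eq_decide]
        set b := l.getD j ' '
        set m := (l.drop (i + 1)).take (j - i - 1)
        have hrev : (b :: m ++ [b]).reverse = b :: m.reverse ++ [b] := by simp
        rw [hrev]
        constructor
        · intro hm; rw [← hm]
        · intro hm
          simp only [List.cons.injEq, List.append_left_inj, true_and] at hm
          exact hm
      · rw [if_pos (by simpa using hac)]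
        symm
        rw [decide_eq_false_iff_not]
        intro hEq
        simp only [List.reverse_append, List.reverse_cons, List.reverse_nil, List.nil_append,
          List.cons_append, List.cons.injEq] at hEq
        exact hac hEq.1
    · rw [pvWhileA, if_neg hij]
      have hle : j + 1 - i ≤ 1 := by omega
      symm
      rw [decide_eq_true_iff]
      rcases Nat.le_one_iff_eq_zero_or_eq_one.mp hle with h0 | h1
      · simp [h0]
      · rw [h1]
        cases l.drop i <;> simp

lemma pv_pal_eq (l : List Char) : pvWhileA l 0 (l.length - 1) = decide (l = l.reverse) := by
  cases l with
  | nil => rw [pvWhileA]; simp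
  | cons c t =>
    rw [pv_while_eq ((c :: t).length - 1) (c :: t) 0 ((c :: t).length - 1) rfl (by simp)]
    have : (c :: t).length - 1 + 1 - 0 = (c :: t).length := by simp
    rw [this]
    simp

-- B's stack loop succeeds exactly when the scanned half is a prefix of the reversed stack
lemma pv_stackLoop_eq : ∀ (rest st : List Char), pvStackLoop st rest = decide (rest <+: st.reverse) := by
  intro rest
  induction rest with
  | nil => intro st; simp [pvStackLoop]
  | cons t r ih =>
    intro st
    rcases List.eq_nil_or_concat st with h | ⟨ys, y, h⟩
    · subst h; simp [pvStackLoop]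
    · subst h
      simp only [List.concat_eq_append]
      have hg : (ys ++ [y]).getLast? = some y := by simp
      have hd : (ys ++ [y]).dropLast = ys := by simp
      have hr : (ys ++ [y]).reverse = y :: ys.reverse := by simp
      rw [pvStackLoop, hg, hd, hr]
      by_cases hy : y = t
      · subst hy
        show (if y ≠ y then false else pvStackLoop ys r) = decide (y :: r <+: y :: ys.reverse)
        rw [if_neg (not_not_intro rfl), ih ys, decide_eq_decide, List.cons_prefix_cons]
        simp
      · show (if y ≠ t then false else pvStackLoop ys r) = decide (t :: r <+: y :: ys.reverse)
        rw [if_pos (by simpa using hy)]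
        symm
        rw [decide_eq_false_iff_not, List.cons_prefix_cons]
        rintro ⟨h1, -⟩
        exact hy h1.symm

-- for an even-length list, the stack test on the two halves is the palindrome test
lemma pv_half_pal (l : List Char) (h : Nat) (hl : l.length = 2 * h) :
    pvStackLoop (l.take h) (l.drop h) = decide (l = l.reverse) := by
  rw [pv_stackLoop_eq, decide_eq_decide]
  have hlen : (l.drop h).length = ((l.take h).reverse).length := by
    simp; omega
  constructor
  · intro hp
    have hdrop : l.drop h = (l.take h).reverse := hp.eq_of_length hlen
    have hl2 : l = l.take h ++ (l.take h).reverse := by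
      conv_lhs => rw [← List.take_append_drop h l, hdrop]
    rw [hl2]
    simp
  · intro hpal
    have hsplit : l.take h ++ l.drop h = (l.drop h).reverse ++ (l.take h).reverse := by
      rw [List.take_append_drop, ← List.reverse_append, List.take_append_drop, ← hpal]
    have := List.append_inj hsplit (by simp; omega)
    rw [this.2]

-- ===== VERDICT (by name: the statement is the Claim_ definition above) =====
theorem isValid3_spec : Claim_equal_isValid3 := by
  intro exp _
  unfold Spec_isValid3 isValid3 isValid3_alt
  simp only [PySem.List.foldl_append_if, List.nil_append, List.map_id']
  rw [pv_replace_single, pv_replace_single, pv_replace_single]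
  simp only [List.map_map]
  have hfused := pv_norm_eq exp.toList
  rw [show ((fun c => if c = '}' then '{' else c) ∘ (fun c => if c = ')' then '(' else c) ∘
        (fun c => if c = ']' then '[' else c)) = pvG from rfl, hfused]
  have hlen : (exp.toList.filter (fun c => PySem.Chars.isIn [c] ("({[]]})".toList))).length
      = (exp.toList.filterMap (fun c => pvNormDict.get? c)).length := by
    rw [← hfused, List.length_map]
  rw [← hlen]
  set k := (exp.toList.filter (fun c => PySem.Chars.isIn [c] ("({[]]})".toList))).length with hk
  by_cases hpar : k % 2 = 1
  · simp [hpar]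
  · rw [if_neg (by omega), if_neg hpar, ← hfused]
    have hS : k = (List.map pvG (exp.toList.filter (fun c => PySem.Chars.isIn [c] ("({[]]})".toList)))).length := by
      rw [hk, List.length_map]
    rw [hS, pv_pal_eq, pv_half_pal _ ((List.map pvG (exp.toList.filter (fun c => PySem.Chars.isIn [c] ("({[]]})".toList)))).length / 2) (by omega)]
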